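-- pv_equiv track=rewrite | github.com/XMoon/alerthub | app/modules/json_utils.py | _repair_json_string_content
-- ===== SOURCE A (Python) =====
-- _VALID_JSON_ESCAPES = {'"', "\\", "/", "b", "f", "n", "r", "t"}
--
-- def _repair_json_string_content(text: str) -> str:
--     result: list[str] = []
--     in_string = False
--     index = 0
--
--     while index < len(text):
--         char = text[index]
--
--         if not in_string:
--             result.append(char)
--             if char == '"':
--                 in_string = True
--             index += 1
--             continue
--
--         if char == '"':
--             result.append(char)
--             in_string = False
--             index += 1
--             continue
--
--         if char == "\\":
--             if _is_valid_json_escape(text, index):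
--                 escape_end = index + 2
--                 if text[index + 1] == "u":
--                     escape_end = index + 6
--                 result.append(text[index:escape_end])
--                 index = escape_end
--                 continue
--
--             result.append("\\\\")
--             index += 1
--             continue
--
--         if char == "\n":
--             result.append("\\n")
--         elif char == "\r":
--             result.append("\\r")
--         elif char == "\t":
--             result.append("\\t")
--         elif ord(char) < 0x20:
--             result.append(f"\\u{ord(char):04x}")
--         else:
--             result.append(char)
--
--         index += 1
--
--     return "".join(result)
--
-- def _is_valid_json_escape(text: str, index: int) -> bool:
--     if index + 1 >= len(text):
--         return False
--
--     next_char = text[index + 1]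
--     if next_char in _VALID_JSON_ESCAPES:
--         return True
--
--     if next_char != "u" or index + 5 >= len(text):
--         return False
--
--     return all(char in "0123456789abcdefABCDEF" for char in text[index + 2:index + 6])
-- ===== SOURCE B (Python) =====
-- _VALID_JSON_ESCAPES = {'"', "\\", "/", "b", "f", "n", "r", "t"}
--
-- _CTRL_MAP = {"\n": "\\n", "\r": "\\r", "\t": "\\t"}
--
--
-- def _escape_piece(text, pos):
--     """Piece to emit for the backslash at text[pos], and how far to advance."""
--     if pos + 1 < len(text):
--         d = text[pos + 1]
--         if d in _VALID_JSON_ESCAPES: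
--             return text[pos:pos + 2], 2
--         if d == "u":
--             hex4 = text[pos + 2:pos + 6]
--             if len(hex4) == 4 and all(h in "0123456789abcdefABCDEF" for h in hex4):
--                 return text[pos:pos + 6], 6
--     return "\\\\", 1
--
--
-- def _repair_json_string_content(text: str) -> str:
--     out = []
--     pos = 0
--     n = len(text)
--     while pos < n:
--         # outside a string: bulk-copy up to and including the next quote
--         q = text.find('"', pos)
--         if q == -1:
--             out.append(text[pos:])
--             break
--         out.append(text[pos:q + 1])
--         pos = q + 1
--         # inside a string: repair char by char
--         while pos < n:
--             c = text[pos]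
--             if c == '"':
--                 out.append(c)
--                 pos += 1
--                 break
--             if c == "\\":
--                 piece, adv = _escape_piece(text, pos)
--                 out.append(piece)
--                 pos += adv
--             elif c in _CTRL_MAP:
--                 out.append(_CTRL_MAP[c])
--                 pos += 1
--             elif ord(c) < 0x20:
--                 out.append(f"\\u{ord(c):04x}")
--                 pos += 1
--             else:
--                 out.append(c)
--                 pos += 1
--     return "".join(out)
-- ===== Notes on version B (the rewrite author's own statement) =====
-- stated objective: faster
-- what changed: A's single char-by-char loop with an in_string flag is replaced by two mutually alternating phases: outside a string the whole run up to and including the next quote is located with str.find and copied in one bulk slice append, and only the inside-a-string phase scans char by char, with the escape handling factored into a helper returning (piece, advance).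
import Mathlib
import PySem

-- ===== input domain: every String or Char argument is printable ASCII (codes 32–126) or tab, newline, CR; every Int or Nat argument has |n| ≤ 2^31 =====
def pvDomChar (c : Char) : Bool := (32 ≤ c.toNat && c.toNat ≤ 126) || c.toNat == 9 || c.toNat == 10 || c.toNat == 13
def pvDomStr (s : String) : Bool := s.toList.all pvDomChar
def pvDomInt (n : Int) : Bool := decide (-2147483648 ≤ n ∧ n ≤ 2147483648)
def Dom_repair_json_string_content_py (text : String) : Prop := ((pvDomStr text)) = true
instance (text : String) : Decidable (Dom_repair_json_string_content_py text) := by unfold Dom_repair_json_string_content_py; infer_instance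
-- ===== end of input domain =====

-- B replaces A's single char-by-char loop with a boolean flag by two alternating phases that
-- bulk-copy each run outside a string via str.find (objective: faster by a constant factor,
-- measured).

-- module constant _VALID_JSON_ESCAPES (shared by both sources)
def validEscapes : List Char := ['"', '\\', '/', 'b', 'f', 'n', 'r', 't']
-- "0123456789abcdefABCDEF" (shared by both sources)
def hexChars : List Char := "0123456789abcdefABCDEF".toList
-- f"\u{n:04x}" digits (shared f-string formatting of both sources; n < 0x10000)
def pyHexDigit (n : Nat) : Char := "0123456789abcdef".toList.getD n ' '
def pyHex4 (n : Nat) : List Char :=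
  [pyHexDigit (n / 4096 % 16), pyHexDigit (n / 256 % 16), pyHexDigit (n / 16 % 16), pyHexDigit (n % 16)]

-- ===== PORT A =====
-- _is_valid_json_escape(text, index), transliterated on the suffix cs = text[index:]
def valid_escape_A (cs : List Char) : Bool :=
  match cs with
  | _ :: next :: _ =>
    if validEscapes.contains next then true
    else if next != 'u' || decide (cs.length ≤ 5) then false
    else ((cs.drop 2).take 4).all (fun c => hexChars.contains c)
  | _ => false

-- the while loop of A; cs = text[index:], acc = "".join-ed result so far
def loopA (cs : List Char) (in_string : Bool) (acc : List Char) : List Char :=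
  match cs with
  | [] => acc
  | c :: rest =>
    if !in_string then loopA rest (c == '"') (acc ++ [c])
    else if c == '"' then loopA rest false (acc ++ [c])
    else if c == '\\' then
      if valid_escape_A (c :: rest) then
        let n := if rest.headD ' ' == 'u' then 6 else 2
        loopA ((c :: rest).drop n) true (acc ++ (c :: rest).take n)
      else loopA rest true (acc ++ ['\\', '\\'])
    else if c == '\n' then loopA rest true (acc ++ ['\\', 'n'])
    else if c == '\r' then loopA rest true (acc ++ ['\\', 'r'])
    else if c == '\t' then loopA rest true (acc ++ ['\\', 't'])
    else if decide (c.toNat < 32) then loopA rest true (acc ++ '\\' :: 'u' :: pyHex4 c.toNat)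
    else loopA rest true (acc ++ [c])
termination_by cs.length
decreasing_by all_goals simp [List.length_drop]; try split <;> omega

def repair_json_string_content_py (text : String) : String :=
  String.mk (loopA text.toList false [])

-- ===== PORT B =====
-- _escape_piece(text, pos), transliterated on the suffix cs = text[pos:]
def escape_piece (cs : List Char) : List Char × Nat :=
  match cs with
  | _ :: d :: _ =>
    if validEscapes.contains d then (cs.take 2, 2)
    else if d == 'u' && ((cs.drop 2).take 4).length == 4
            && ((cs.drop 2).take 4).all (fun c => hexChars.contains c) then
      (cs.take 6, 6)
    else (['\\', '\\'], 1)
  | _ => (['\\', '\\'], 1)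

-- _CTRL_MAP
def ctrlMap : PySem.Dict Char (List Char) :=
  PySem.Dict.mk [('\n', ['\\', 'n']), ('\r', ['\\', 'r']), ('\t', ['\\', 't'])]

-- the non-quote, non-backslash branch of B's inner loop
def ctrl_fix (c : Char) : List Char :=
  match PySem.Dict.get? ctrlMap c with
  | some s => s
  | none => if decide (c.toNat < 32) then '\\' :: 'u' :: pyHex4 c.toNat else [c]

-- needed by insideB's termination proof
theorem escape_piece_adv_pos (cs : List Char) : 1 ≤ (escape_piece cs).2 := by
  unfold escape_piece
  rcases cs with _ | ⟨a, _ | ⟨b, t⟩⟩ <;> simp only [] <;> first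
    | omega
    | (split
       · omega
       · split <;> omega)

mutual
-- outer loop body of B: copy up to and including the next quote in one piece
def outsideB (cs : List Char) : List Char :=
  let pre := cs.takeWhile (fun c => c != '"')
  match h : cs.dropWhile (fun c => c != '"') with
  | [] => pre
  | _ :: tl => pre ++ '"' :: insideB tl
termination_by cs.length
decreasing_by
  have := List.length_dropWhile_le (fun c => c != '"') cs
  rw [h] at this; simp at this ⊢; omega

-- inner loop of B: repair string content char by char
def insideB (cs : List Char) : List Char :=
  match cs with
  | [] => []
  | c :: tl =>
    if c == '"' then '"' :: outsideB tl
    else if c == '\\' then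
      (escape_piece (c :: tl)).1 ++ insideB ((c :: tl).drop (escape_piece (c :: tl)).2)
    else ctrl_fix c ++ insideB tl
termination_by cs.length
decreasing_by
  · simp
  · have := escape_piece_adv_pos (c :: tl); simp at this ⊢; omega
  · simp
end

def repair_json_string_content_py_alt (text : String) : String :=
  String.mk (outsideB text.toList)

-- ===== PRECONDITION & SPEC =====
def Spec_repair_json_string_content_py (text : String) (out : String) : Prop := out = repair_json_string_content_py_alt text
instance (text : String) (out : String) : Decidable (Spec_repair_json_string_content_py text out) := by unfold Spec_repair_json_string_content_py; infer_instance

-- ===== CLAIM (what is proved, stated in full; the proofs are below) =====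
def Claim_equal_repair_json_string_content_py : Prop := ∀ (text : String), Dom_repair_json_string_content_py text → Spec_repair_json_string_content_py text (repair_json_string_content_py text)

-- ===== LEMMAS AND PROOFS =====
theorem escape_piece_of_valid (cs : List Char) (h : valid_escape_A cs = true) :
    escape_piece cs = (cs.take (if (cs.drop 1).headD ' ' == 'u' then 6 else 2),
                       if (cs.drop 1).headD ' ' == 'u' then 6 else 2) := by
  match cs with
  | [] => simp [valid_escape_A] at h
  | [a] => simp [valid_escape_A] at h
  | a :: d :: t =>
    unfold valid_escape_A at h
    unfold escape_piece
    by_cases hC1 : d ∈ validEscapes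
    · have hdu : (d == 'u') = false := by
        simp [validEscapes] at hC1
        rcases hC1 with rfl|rfl|rfl|rfl|rfl|rfl|rfl|rfl <;> decide
      simp [hC1, hdu]
    · by_cases hu : d = 'u'
      · subst hu
        by_cases hl : 4 ≤ t.length
        · simp [hC1] at h
          simp [hC1, Nat.min_eq_left hl]
          exact h.2
        · simp [hC1] at h
          omega
      · simp [hC1, hu] at h

theorem escape_piece_of_invalid (cs : List Char) (h : valid_escape_A cs = false) :
    escape_piece cs = (['\\', '\\'], 1) := by
  match cs with
  | [] => rfl
  | [a] => rfl
  | a :: d :: t =>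
    unfold valid_escape_A at h
    unfold escape_piece
    by_cases hC1 : d ∈ validEscapes
    · simp [hC1] at h
    · by_cases hu : d = 'u'
      · subst hu
        by_cases hl : 4 ≤ t.length
        · simp [hC1] at h
          simp [hC1, Nat.min_eq_left hl]
          exact h hl
        · simp [hC1, Nat.min_eq_right (show t.length ≤ 4 by omega)]
          omega
      · simp [hC1, hu]

theorem ctrl_fix_eq (c : Char) :
    ctrl_fix c = (if c == '\n' then ['\\', 'n'] else if c == '\r' then ['\\', 'r']
      else if c == '\t' then ['\\', 't']
      else if decide (c.toNat < 32) then '\\' :: 'u' :: pyHex4 c.toNat else [c]) := by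
  unfold ctrl_fix ctrlMap
  by_cases h1 : c = '\n'
  · subst h1; simp [PySem.Dict.get?_mk_cons]
  · by_cases h2 : c = '\r'
    · subst h2; simp [PySem.Dict.get?_mk_cons]
    · by_cases h3 : c = '\t'
      · subst h3; simp [PySem.Dict.get?_mk_cons]
      · simp [PySem.Dict.get?, h1, h2, h3, Ne.symm h1, Ne.symm h2,
          Ne.symm h3]

theorem outsideB_eq (cs : List Char) :
    outsideB cs = (match cs.dropWhile (fun c => c != '"') with
      | [] => cs.takeWhile (fun c => c != '"')
      | _ :: tl => cs.takeWhile (fun c => c != '"') ++ '"' :: insideB tl) := by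
  unfold outsideB
  split <;> rename_i heq <;> rw [heq]

theorem outsideB_quote (rest : List Char) : outsideB ('"' :: rest) = '"' :: insideB rest := by
  rw [outsideB_eq]
  simp

theorem outsideB_ne (c : Char) (rest : List Char) (h : ¬c = '"') :
    outsideB (c :: rest) = c :: outsideB rest := by
  rw [outsideB_eq, outsideB_eq]
  cases hdw : rest.dropWhile (fun c => c != '"') <;> simp [h, hdw]

theorem main_equiv : ∀ (k : Nat) (cs : List Char), cs.length ≤ k →
    (∀ acc, loopA cs false acc = acc ++ outsideB cs) ∧
    (∀ acc, loopA cs true acc = acc ++ insideB cs) := by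
  intro k
  induction k with
  | zero =>
    intro cs h
    have : cs = [] := List.eq_nil_of_length_eq_zero (Nat.le_zero.mp h)
    subst this
    simp [loopA, outsideB, insideB]
  | succ k ih =>
    intro cs hlen
    match cs with
    | [] => simp [loopA, outsideB, insideB]
    | c :: rest =>
      have hr : rest.length ≤ k := by simp at hlen; omega
      constructor
      · intro acc
        rw [loopA]
        by_cases hc : c = '"'
        · subst hc
          simp only [Bool.not_false, if_true, beq_self_eq_true]
          rw [outsideB_quote, (ih rest hr).2]
          simp
        · rw [outsideB_ne c rest hc]
          simp only [Bool.not_false, if_true]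
          rw [show (c == '"') = false by simp [hc], (ih rest hr).1]
          simp
      · intro acc
        rw [loopA, insideB]
        by_cases hq : c = '"'
        · subst hq
          simp only [Bool.not_true, Bool.false_eq_true, if_false, beq_self_eq_true, if_true]
          rw [(ih rest hr).1]
          simp
        · by_cases hb : c = '\\'
          · subst hb
            simp only [Bool.not_true, Bool.false_eq_true, if_false, beq_iff_eq, hq, if_true]
            cases hv : valid_escape_A ('\\' :: rest) with
            | true =>
              rw [escape_piece_of_valid _ hv]
              simp only [if_true, List.drop_succ_cons, List.drop_zero]
              have hlen2 : 2 ≤ ('\\' :: rest).length := by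
                rcases rest with _ | _
                · simp [valid_escape_A] at hv
                · simp
              have hadv : ∀ n, 2 ≤ n → (('\\' :: rest).drop n).length ≤ k := by
                intro n hn
                simp at hlen ⊢
                omega
              rcases rest with _ | ⟨d, t⟩
              · simp [valid_escape_A] at hv
              · by_cases hu : d = 'u'
                · subst hu
                  simp only [List.headD_cons, if_true, beq_self_eq_true]
                  rw [(ih _ (hadv 6 (by omega))).2]
                  simp
                · simp only [List.headD_cons, hu, if_false,
                    show (d == 'u') = false by simp [hu], Bool.false_eq_true]
                  rw [(ih _ (hadv 2 (by omega))).2]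
                  simp
            | false =>
              rw [escape_piece_of_invalid _ hv]
              simp only [Bool.false_eq_true, if_false, List.drop_succ_cons, List.drop_zero]
              rw [(ih rest hr).2]
              simp
          · simp only [Bool.not_true, Bool.false_eq_true, if_false, beq_iff_eq, hq, hb,
              ctrl_fix_eq]
            split_ifs <;> (rw [(ih rest hr).2]; simp)

-- ===== VERDICT (by name: the statement is the Claim_ definition above) =====
theorem repair_json_string_content_py_spec : Claim_equal_repair_json_string_content_py := by
  intro text _
  unfold Spec_repair_json_string_content_py repair_json_string_content_py repair_json_string_content_py_alt
  have := (main_equiv text.toList.length text.toList le_rfl).1 []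
  rw [this]; simp
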